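-- pv_equiv track=rewrite | github.com/Isragadiel/Proyectos- | Trabajo Integrador Python 1er semestre/TP Matematicas II/TP_Integracion.py | complemento_U
-- ===== SOURCE A (Python) =====
-- def generador_de_conjuntos(dni: int):
--     conjuntos: list[int] = []
--     for i in range(10):
--         if str(i) in str(dni):
--             conjuntos.append(i)
--     return conjuntos
--
-- def union(dnis: list[int]) -> list[int]:
--     if not dnis:
--         return []
--
--     conjunto_unico = set()
--     for dni in dnis:
--         conjunto_unico.update(generador_de_conjuntos(dni))
--
--     return list(conjunto_unico)
--
-- def complemento_U(lista_dni) -> bool: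
--     """
--     Realiza el complemento del conjunto X, siendo X una union de conjuntos formados por dígitos del 0 al 9
--     a partir de los DNI de los usuarios, respecto al conjunto universal definido como x/x ∈ Z y 0<= x <= 9.
--
--     Args:
--         List: Con los documentos ingresados por el usuario.
--
--     Returns:
--           Bool: True si no es un conjunto vacio y False si es un conjunto vacio.
--     """
--     x = union(lista_dni)
--     c = []
--     for i in range(10):
--         if i not in x:
--             c.append(i)
--
--     if c == []:
--         return False
--     else:
--         return True
-- ===== SOURCE B (Python) =====
-- def complemento_U(lista_dni) -> bool:
--     seen = set()
--     for dni in lista_dni: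
--         for ch in str(dni):
--             if '0' <= ch <= '9':
--                 seen.add(ch)
--     return len(seen) < 10
-- ===== Notes on version B (the rewrite author's own statement) =====
-- stated objective: faster
-- what changed: B makes one pass over the characters of each DNI, collecting the digit characters into a single set and returning len(seen) < 10, instead of A's per-DNI loop over the ten digit values with a substring test each plus a second complement-building pass over range(10).
import Mathlib
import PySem

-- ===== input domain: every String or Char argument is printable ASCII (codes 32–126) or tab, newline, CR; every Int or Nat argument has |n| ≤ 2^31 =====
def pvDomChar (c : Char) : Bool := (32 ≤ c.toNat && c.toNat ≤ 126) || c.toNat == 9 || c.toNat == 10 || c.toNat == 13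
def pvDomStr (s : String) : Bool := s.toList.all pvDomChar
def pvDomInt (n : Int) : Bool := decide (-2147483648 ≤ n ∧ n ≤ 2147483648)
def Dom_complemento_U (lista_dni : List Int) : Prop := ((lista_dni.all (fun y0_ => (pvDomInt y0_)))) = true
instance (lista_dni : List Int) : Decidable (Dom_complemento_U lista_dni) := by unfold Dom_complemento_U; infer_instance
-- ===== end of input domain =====

-- B replaces A's two passes over the fixed digit range 0..9 (substring test per digit per DNI,
-- then a complement-building pass) by a single character scan collecting digit chars into one set.

-- ===== PORT A =====
def gen_conjuntos (dni : Int) : List Int :=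
  (PySem.List.pyRange 0 10 1).foldl
    (fun conjuntos i =>
      if PySem.Str.isIn (PySem.Int.toStr i) (PySem.Int.toStr dni) then conjuntos ++ [i]
      else conjuntos)
    []

def union_dnis (dnis : List Int) : List Int :=
  if dnis = [] then []
  else
    dnis.foldl
      (fun conjunto_unico dni => PySem.Set.update conjunto_unico (gen_conjuntos dni))
      PySem.Set.empty

def complemento_U (lista_dni : List Int) : Bool :=
  let x := union_dnis lista_dni
  let c := (PySem.List.pyRange 0 10 1).foldl
    (fun c i => if ¬ (i ∈ x) then c ++ [i] else c) []
  if c = [] then false else true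

-- ===== PORT B =====
def complemento_U_alt (lista_dni : List Int) : Bool :=
  let seen : PySem.Set Char :=
    lista_dni.foldl
      (fun seen dni =>
        (PySem.Int.toChars dni).foldl
          (fun s ch => if '0' ≤ ch ∧ ch ≤ '9' then PySem.Set.add s ch else s)
          seen)
      PySem.Set.empty
  decide (seen.length < 10)

-- ===== PRECONDITION & SPEC =====
def Spec_complemento_U (lista_dni : List Int) (out : Bool) : Prop := out = complemento_U_alt lista_dni
instance (lista_dni : List Int) (out : Bool) : Decidable (Spec_complemento_U lista_dni out) := by unfold Spec_complemento_U; infer_instance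

-- ===== CLAIM (what is proved, stated in full; the proofs are below) =====
def Claim_equal_complemento_U : Prop := ∀ (lista_dni : List Int), Dom_complemento_U lista_dni → Spec_complemento_U lista_dni (complemento_U lista_dni)

-- ===== LEMMAS AND PROOFS =====

-- the set B's outer loop builds
def seenF (lista : List Int) : PySem.Set Char :=
  lista.foldl
    (fun seen dni =>
      (PySem.Int.toChars dni).foldl
        (fun s ch => if '0' ≤ ch ∧ ch ≤ '9' then PySem.Set.add s ch else s)
        seen)
    PySem.Set.empty

theorem alt_eq (lista : List Int) :
    complemento_U_alt lista = decide ((seenF lista).length < 10) := rfl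

def digitsL : List Char := ['0','1','2','3','4','5','6','7','8','9']

theorem dig_mem_digits (c : Char) : ('0' ≤ c ∧ c ≤ '9') ↔ c ∈ digitsL := by
  constructor
  · rintro ⟨h1, h2⟩
    rw [Char.le_def, UInt32.le_iff_toNat_le] at h1 h2
    have hb : 48 ≤ c.toNat ∧ c.toNat ≤ 57 := ⟨h1, h2⟩
    have : c.toNat = 48 ∨ c.toNat = 49 ∨ c.toNat = 50 ∨ c.toNat = 51 ∨ c.toNat = 52 ∨
        c.toNat = 53 ∨ c.toNat = 54 ∨ c.toNat = 55 ∨ c.toNat = 56 ∨ c.toNat = 57 := by omega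
    rcases this with h | h | h | h | h | h | h | h | h | h <;>
      rw [← Char.ofNat_toNat c, h] <;> decide
  · intro h
    simp only [digitsL, List.mem_cons, List.not_mem_nil, or_false] at h
    rcases h with rfl | rfl | rfl | rfl | rfl | rfl | rfl | rfl | rfl | rfl <;> decide

theorem inner_mem (cs : List Char) (s : PySem.Set Char) (c : Char) :
    c ∈ cs.foldl (fun s ch => if '0' ≤ ch ∧ ch ≤ '9' then PySem.Set.add s ch else s) s ↔
      c ∈ s ∨ (('0' ≤ c ∧ c ≤ '9') ∧ c ∈ cs) := by
  induction cs generalizing s with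
  | nil => simp
  | cons h t ih =>
    simp only [List.foldl_cons]
    by_cases hd : '0' ≤ h ∧ h ≤ '9'
    · rw [if_pos hd, ih]
      rw [PySem.Set.mem_add]
      constructor
      · rintro ((hc | rfl) | ⟨hdig, hm⟩)
        · exact Or.inl hc
        · exact Or.inr ⟨hd, List.mem_cons_self⟩
        · exact Or.inr ⟨hdig, List.mem_cons_of_mem _ hm⟩
      · rintro (hc | ⟨hdig, hm⟩)
        · exact Or.inl (Or.inl hc)
        · rcases List.mem_cons.mp hm with rfl | hm
          · exact Or.inl (Or.inr rfl)
          · exact Or.inr ⟨hdig, hm⟩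
    · rw [if_neg hd, ih]
      constructor
      · rintro (hc | ⟨hdig, hm⟩)
        · exact Or.inl hc
        · exact Or.inr ⟨hdig, List.mem_cons_of_mem _ hm⟩
      · rintro (hc | ⟨hdig, hm⟩)
        · exact Or.inl hc
        · rcases List.mem_cons.mp hm with rfl | hm
          · exact absurd hdig hd
          · exact Or.inr ⟨hdig, hm⟩

theorem inner_nodup (cs : List Char) (s : PySem.Set Char) (h : s.Nodup) :
    (cs.foldl (fun s ch => if '0' ≤ ch ∧ ch ≤ '9' then PySem.Set.add s ch else s) s).Nodup := by
  induction cs generalizing s with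
  | nil => exact h
  | cons c t ih =>
    simp only [List.foldl_cons]
    by_cases hd : '0' ≤ c ∧ c ≤ '9'
    · rw [if_pos hd]; exact ih _ (PySem.Set.nodup_add s c h)
    · rw [if_neg hd]; exact ih _ h

theorem seen_mem_aux (lista : List Int) (s : PySem.Set Char) (c : Char) :
    c ∈ lista.foldl
        (fun seen dni =>
          (PySem.Int.toChars dni).foldl
            (fun s ch => if '0' ≤ ch ∧ ch ≤ '9' then PySem.Set.add s ch else s) seen) s ↔
      c ∈ s ∨ (('0' ≤ c ∧ c ≤ '9') ∧ ∃ d ∈ lista, c ∈ PySem.Int.toChars d) := by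
  induction lista generalizing s with
  | nil => simp
  | cons d t ih =>
    simp only [List.foldl_cons]
    rw [ih, inner_mem]
    constructor
    · rintro ((hc | ⟨hdig, hm⟩) | ⟨hdig, e, he, hce⟩)
      · exact Or.inl hc
      · exact Or.inr ⟨hdig, d, List.mem_cons_self, hm⟩
      · exact Or.inr ⟨hdig, e, List.mem_cons_of_mem _ he, hce⟩
    · rintro (hc | ⟨hdig, e, he, hce⟩)
      · exact Or.inl (Or.inl hc)
      · rcases List.mem_cons.mp he with rfl | he
        · exact Or.inl (Or.inr ⟨hdig, hce⟩)
        · exact Or.inr ⟨hdig, e, he, hce⟩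

theorem seen_mem (lista : List Int) (c : Char) :
    c ∈ seenF lista ↔ (('0' ≤ c ∧ c ≤ '9') ∧ ∃ d ∈ lista, c ∈ PySem.Int.toChars d) := by
  unfold seenF
  rw [seen_mem_aux]
  simp [PySem.Set.empty]

theorem seen_nodup (lista : List Int) : (seenF lista).Nodup := by
  have aux : ∀ (l : List Int) (s : PySem.Set Char), s.Nodup →
      (l.foldl
        (fun seen dni =>
          (PySem.Int.toChars dni).foldl
            (fun s ch => if '0' ≤ ch ∧ ch ≤ '9' then PySem.Set.add s ch else s) seen) s).Nodup := by
    intro l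
    induction l with
    | nil => intro s hs; exact hs
    | cons d t ih =>
      intro s hs
      exact ih _ (inner_nodup _ _ hs)
  exact aux lista PySem.Set.empty (by simp [PySem.Set.empty])

theorem seen_sub (lista : List Int) : seenF lista ⊆ digitsL := fun c hc =>
  (dig_mem_digits c).mp ((seen_mem lista c).mp hc).1

theorem len_iff (lista : List Int) :
    ((seenF lista).length < 10) ↔ ¬ (∀ c ∈ digitsL, c ∈ seenF lista) := by
  constructor
  · intro hlt hall
    have hsub : digitsL ⊆ seenF lista := fun c hc => hall c hc
    have h10 : digitsL.length ≤ (seenF lista).length :=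
      (List.subperm_of_subset (by decide) hsub).length_le
    simp [digitsL] at h10
    omega
  · intro hn
    by_contra hlt
    rw [not_lt] at hlt
    have sp := List.subperm_of_subset (seen_nodup lista) (seen_sub lista)
    have hperm := sp.perm_of_length_le (by simpa [digitsL] using hlt)
    exact hn fun c hc => hperm.mem_iff.mpr hc

-- A-side characterisations
theorem mem_gen (dni i : Int) :
    i ∈ gen_conjuntos dni ↔
      i ∈ PySem.List.pyRange 0 10 1 ∧
        PySem.Str.isIn (PySem.Int.toStr i) (PySem.Int.toStr dni) = true := by
  unfold gen_conjuntos
  rw [PySem.List.foldl_append_if_eq_filter]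
  simp [List.mem_filter]

theorem mem_union_aux (lista : List Int) (s : PySem.Set Int) (i : Int) :
    i ∈ lista.foldl (fun cu dni => PySem.Set.update cu (gen_conjuntos dni)) s ↔
      i ∈ s ∨ ∃ d ∈ lista, i ∈ gen_conjuntos d := by
  induction lista generalizing s with
  | nil => simp
  | cons d t ih =>
    simp only [List.foldl_cons]
    rw [ih, PySem.Set.mem_update]
    constructor
    · rintro ((hc | hg) | ⟨e, he, hg⟩)
      · exact Or.inl hc
      · exact Or.inr ⟨d, List.mem_cons_self, hg⟩
      · exact Or.inr ⟨e, List.mem_cons_of_mem _ he, hg⟩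
    · rintro (hc | ⟨e, he, hg⟩)
      · exact Or.inl (Or.inl hc)
      · rcases List.mem_cons.mp he with rfl | he
        · exact Or.inl (Or.inr hg)
        · exact Or.inr ⟨e, he, hg⟩

theorem mem_union (lista : List Int) (i : Int) :
    i ∈ union_dnis lista ↔ ∃ d ∈ lista, i ∈ gen_conjuntos d := by
  unfold union_dnis
  split
  · rename_i h; subst h; simp
  · rw [mem_union_aux]; simp [PySem.Set.empty]

theorem isIn_single (i : Int) (c : Char) (hc : PySem.Int.toChars i = [c]) (d : Int) :
    PySem.Str.isIn (PySem.Int.toStr i) (PySem.Int.toStr d) = true ↔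
      c ∈ PySem.Int.toChars d := by
  rw [PySem.Str.isIn_iff_infix, PySem.Int.toList_toStr, PySem.Int.toList_toStr, hc]
  exact List.singleton_infix_iff c _

theorem key_iff (lista : List Int) (i : Int) (c : Char)
    (hrange : i ∈ PySem.List.pyRange 0 10 1)
    (hc : PySem.Int.toChars i = [c]) (hdig : '0' ≤ c ∧ c ≤ '9') :
    i ∈ union_dnis lista ↔ c ∈ seenF lista := by
  rw [mem_union, seen_mem]
  constructor
  · rintro ⟨d, hd, hg⟩
    exact ⟨hdig, d, hd, (isIn_single i c hc d).mp ((mem_gen d i).mp hg).2⟩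
  · rintro ⟨_, d, hd, hcd⟩
    exact ⟨d, hd, (mem_gen d i).mpr ⟨hrange, (isIn_single i c hc d).mpr hcd⟩⟩

def pairsIC : List (Int × Char) :=
  [(0,'0'),(1,'1'),(2,'2'),(3,'3'),(4,'4'),(5,'5'),(6,'6'),(7,'7'),(8,'8'),(9,'9')]

theorem cover_iff (lista : List Int) :
    (∀ i ∈ PySem.List.pyRange 0 10 1, i ∈ union_dnis lista) ↔
      (∀ c ∈ digitsL, c ∈ seenF lista) := by
  have hkey : ∀ p ∈ pairsIC, (p.1 ∈ union_dnis lista ↔ p.2 ∈ seenF lista) := by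
    intro p hp
    fin_cases hp <;> exact key_iff lista _ _ (by decide) (by decide) (by decide)
  have hr : PySem.List.pyRange 0 10 1 = pairsIC.map Prod.fst := by decide
  have hd : digitsL = pairsIC.map Prod.snd := by decide
  constructor
  · intro h c hc
    rw [hd] at hc
    obtain ⟨p, hp, rfl⟩ := List.mem_map.mp hc
    exact (hkey p hp).mp (h p.1 (by rw [hr]; exact List.mem_map_of_mem hp))
  · intro h i hi
    rw [hr] at hi
    obtain ⟨p, hp, rfl⟩ := List.mem_map.mp hi
    exact (hkey p hp).mpr (h p.2 (by rw [hd]; exact List.mem_map_of_mem hp))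

theorem if_nil_eq (c : List Int) : (if c = [] then false else true) = !decide (c = []) := by
  by_cases h : c = [] <;> simp [h]

-- ===== VERDICT (by name: the statement is the Claim_ definition above) =====
theorem complemento_U_spec : Claim_equal_complemento_U := by
  intro lista _
  unfold Spec_complemento_U complemento_U
  rw [alt_eq]
  simp only []
  rw [PySem.List.foldl_append_ite_eq_filter (p := fun i => ¬ i ∈ union_dnis lista)]
  rw [List.nil_append, if_nil_eq]
  have h1 : (List.filter (fun i => decide ¬i ∈ union_dnis lista) (PySem.List.pyRange 0 10 1) = []) ↔
      (∀ c ∈ digitsL, c ∈ seenF lista) := by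
    rw [List.filter_eq_nil_iff]
    simp only [decide_eq_true_eq, not_not]
    exact cover_iff lista
  have h2 : ((seenF lista).length < 10) ↔
      ¬ (List.filter (fun i => decide ¬i ∈ union_dnis lista) (PySem.List.pyRange 0 10 1) = []) :=
    (len_iff lista).trans (not_congr h1.symm)
  by_cases hc : List.filter (fun i => decide ¬i ∈ union_dnis lista) (PySem.List.pyRange 0 10 1) = []
  · have hl : ¬ ((seenF lista).length < 10) := fun hF => (h2.mp hF) hc
    rw [decide_eq_true hc, decide_eq_false hl]
    rfl
  · have hl : (seenF lista).length < 10 := h2.mpr hc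
    rw [decide_eq_false hc, decide_eq_true hl]
    rfl
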